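-- pv_equiv track=rewrite | github.com/Mahesh9645/Python_Interview_Coding_Questions | Python_Interview_Coding/Numbers_Coding/sum_max_min.py | sum_maxi_number
-- ===== SOURCE A (Python) =====
-- def sum_maxi_number(numbers):
--     """
--     This function takes a list of numbers as input and returns the total sum,
--     maximum number, and minimum number in the list.
--     """
--     total = 0  # Initialize the total sum
--     max_number = numbers[0]  # Start with the first number as the maximum
--     mini_number = numbers[0]  # Start with the first number as the minimum
--
--     for i in numbers:
--         total += i  # Add the current number to the total
--         if i > max_number:  # Check for new maximum
--             max_number = i
--         elif i < mini_number:  # Check for new minimum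
--             mini_number = i
--
--     return total, max_number, mini_number
-- ===== SOURCE B (Python) =====
-- def sum_maxi_number(numbers):
--     """Return (sum, max, min) of the list using the library scans."""
--     return sum(numbers), max(numbers), min(numbers)
-- ===== Notes on version B (the rewrite author's own statement) =====
-- stated objective: idiomatic
-- what changed: Replaces the single hand-written accumulator loop (seeded at numbers[0], with an if/elif update) by three independent library scans sum/max/min returned as a triple; Pre_ excludes the empty list, on which both A and B raise.
import Mathlib
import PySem

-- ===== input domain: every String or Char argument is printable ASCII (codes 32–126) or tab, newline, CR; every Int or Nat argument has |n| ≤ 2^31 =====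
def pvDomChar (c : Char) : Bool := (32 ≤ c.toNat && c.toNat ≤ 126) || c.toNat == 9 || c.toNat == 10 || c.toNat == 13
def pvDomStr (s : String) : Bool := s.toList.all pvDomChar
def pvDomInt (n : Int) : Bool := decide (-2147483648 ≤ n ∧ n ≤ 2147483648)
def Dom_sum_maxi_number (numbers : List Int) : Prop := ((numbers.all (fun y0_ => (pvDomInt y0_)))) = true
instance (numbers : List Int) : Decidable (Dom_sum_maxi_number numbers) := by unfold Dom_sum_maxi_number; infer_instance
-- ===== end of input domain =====

-- B replaces A's single accumulator loop by three independent library scans (sum/max/min); idiomatic, same cost.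
-- Both A and B raise on the empty list (IndexError vs ValueError), so Pre_ excludes it.

-- ===== PORT A =====
-- A's loop over (total, max_number, mini_number), seeded with numbers[0]; the if/elif kept as nested ifs.
def sum_maxi_number (numbers : List Int) : Int × Int × Int :=
  match numbers with
  | [] => (0, 0, 0)   -- unreachable under Pre_ (Python raises IndexError here)
  | h :: _ =>
    numbers.foldl
      (fun (st : Int × Int × Int) i =>
        (st.1 + i,
         if i > st.2.1 then i else st.2.1,
         if i > st.2.1 then st.2.2 else if i < st.2.2 then i else st.2.2))
      (0, h, h)

-- ===== PORT B =====
-- Source B: return sum(numbers), max(numbers), min(numbers)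
def sum_maxi_number_alt (numbers : List Int) : Int × Int × Int :=
  (numbers.sum,
   (PySem.List.max? numbers (fun x => x)).getD 0,
   (PySem.List.min? numbers (fun x => x)).getD 0)

-- ===== PRECONDITION & SPEC =====
-- Pre_ excludes the empty list, on which Python A raises IndexError (and B raises ValueError).
def Pre_sum_maxi_number (numbers : List Int) : Prop := numbers ≠ []
instance (numbers : List Int) : Decidable (Pre_sum_maxi_number numbers) := by unfold Pre_sum_maxi_number; infer_instance
def pvWitness_sum_maxi_number : List Int := [3, -1, 4, 1, 5]

def Spec_sum_maxi_number (numbers : List Int) (out : Int × Int × Int) : Prop := out = sum_maxi_number_alt numbers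
instance (numbers : List Int) (out : Int × Int × Int) : Decidable (Spec_sum_maxi_number numbers out) := by unfold Spec_sum_maxi_number; infer_instance

-- ===== CLAIM (what is proved, stated in full; the proofs are below) =====
def Claim_equal_sum_maxi_number : Prop := ∀ (numbers : List Int), Dom_sum_maxi_number numbers → Pre_sum_maxi_number numbers → Spec_sum_maxi_number numbers (sum_maxi_number numbers)

-- ===== LEMMAS AND PROOFS =====

-- Invariant of A's loop: provided min ≤ max, the fold computes the running sum, max and min.
theorem foldA_inv (l : List Int) : ∀ (t mx mn : Int), mn ≤ mx →
    l.foldl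
      (fun (st : Int × Int × Int) i =>
        (st.1 + i,
         if i > st.2.1 then i else st.2.1,
         if i > st.2.1 then st.2.2 else if i < st.2.2 then i else st.2.2))
      (t, mx, mn)
    = (t + l.sum, l.foldl max mx, l.foldl min mn) := by
  induction l with
  | nil => intro t mx mn _; simp
  | cons i l ih =>
    intro t mx mn hle
    simp only [List.foldl_cons]
    rw [ih]
    · have e1 : (if i > mx then i else mx) = max mx i := by
        simp only [gt_iff_lt]; split_ifs <;> omega
      have e2 : (if i > mx then mn else if i < mn then i else mn) = min mn i := by
        simp only [gt_iff_lt]; split_ifs <;> omega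
      rw [e1, e2]
      simp [List.sum_cons, add_assoc]
    · simp only [gt_iff_lt]
      split_ifs <;> omega

-- ===== VERDICT (by name: the statement is the Claim_ definition above) =====
theorem sum_maxi_number_spec : Claim_equal_sum_maxi_number := by
  intro numbers _ hpre
  unfold Spec_sum_maxi_number
  cases numbers with
  | nil => exact absurd rfl hpre
  | cons h t =>
    have hA : sum_maxi_number (h :: t) =
        (0 + (h :: t).sum, (h :: t).foldl max h, (h :: t).foldl min h) := by
      rw [show sum_maxi_number (h :: t) = List.foldl
          (fun (st : Int × Int × Int) i =>
            (st.1 + i,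
             if i > st.2.1 then i else st.2.1,
             if i > st.2.1 then st.2.2 else if i < st.2.2 then i else st.2.2))
          (0, h, h) (h :: t) from rfl]
      exact foldA_inv _ _ _ _ (le_refl h)
    rw [hA]
    unfold sum_maxi_number_alt
    simp [PySem.List.max?_id_cons, PySem.List.min?_id_cons, List.foldl_cons, max_self, min_self]
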